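-- pv_equiv track=rewrite | github.com/jasonyux/TriPosT | runners/data_collector/word_sorting/get_rationale.py | _sort_and_group_by_nth_letter
-- ===== SOURCE A (Python) =====
-- def _sort_and_group_by_nth_letter(words, n):
-- 	group_by_idx = {}
-- 	for word in words:
-- 		char_idx = ord(word[n]) - ord('a') + 1
-- 		if char_idx not in group_by_idx:
-- 			group_by_idx[char_idx] = []
-- 		group_by_idx[char_idx].append(word)
-- 	sorted_keys = sorted(group_by_idx.keys())
--
-- 	subpart_w_idx = []
-- 	subparts_to_sort = []
-- 	for idx in sorted_keys:
-- 		word_list = group_by_idx[idx]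
-- 		if len(word_list) > 1:
-- 			s = " ? ".join([f'"{w}"' for w in word_list])
-- 			s = f'({idx}) [{s}]'
-- 			subparts_to_sort.append(word_list)
-- 		else:
-- 			w = word_list[0]
-- 			s = f'({idx}) "{w}"'
-- 		subpart_w_idx.append(s)
-- 	return " < ".join(subpart_w_idx), subparts_to_sort
-- ===== SOURCE B (Python) =====
-- def _format_group(idx, group):
-- 	if len(group) > 1:
-- 		return '({}) [{}]'.format(idx, " ? ".join('"{}"'.format(w) for w in group))
-- 	return '({}) "{}"'.format(idx, group[0])
--
--
-- def _sort_and_group_by_nth_letter(words, n):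
-- 	idxs = sorted({ord(w[n]) - ord('a') + 1 for w in words})
-- 	groups = [[w for w in words if ord(w[n]) - ord('a') + 1 == idx] for idx in idxs]
-- 	parts = [_format_group(idx, g) for idx, g in zip(idxs, groups)]
-- 	return " < ".join(parts), [g for g in groups if len(g) > 1]
-- ===== Notes on version B (the rewrite author's own statement) =====
-- stated objective: simpler
-- what changed: Replaced the mutable dict-of-lists grouping pass plus key sort by a direct declarative pipeline: sort the set of letter indices, build each group with a per-key filter comprehension, format with map/zip/join, and take the oversized groups by a final filter.
import Mathlib
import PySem

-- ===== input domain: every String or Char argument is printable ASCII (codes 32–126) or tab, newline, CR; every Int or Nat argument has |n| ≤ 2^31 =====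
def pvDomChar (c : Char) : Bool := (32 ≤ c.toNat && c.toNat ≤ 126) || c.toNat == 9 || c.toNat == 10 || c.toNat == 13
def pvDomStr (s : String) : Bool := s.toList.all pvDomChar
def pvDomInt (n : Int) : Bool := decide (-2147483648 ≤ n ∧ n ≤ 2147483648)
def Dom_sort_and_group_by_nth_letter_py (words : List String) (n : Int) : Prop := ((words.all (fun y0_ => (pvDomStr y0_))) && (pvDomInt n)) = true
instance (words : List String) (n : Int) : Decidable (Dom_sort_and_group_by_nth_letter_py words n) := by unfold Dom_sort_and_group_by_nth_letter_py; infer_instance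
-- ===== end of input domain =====

-- B replaces A's mutable dict-of-lists grouping pass by a declarative pipeline (sorted key set, per-key
-- filter comprehensions, map/zip/join) — objective: simpler; same return value on Pre_ (no speed claim).

-- ===== PORT A =====
def sort_and_group_by_nth_letter_py (words : List String) (n : Int) : String × List (List String) :=
  -- 'for word in words: char_idx = ord(word[n]) - ord('a') + 1; if char_idx not in d: d[char_idx] = []; d[char_idx].append(word)'
  -- word[n] raising IndexError (pyGet? = none) is excluded by Pre_; the none branch is a totality guard only
  let d : PySem.Dict Int (List String) :=
    words.foldl (fun d word =>
      match PySem.Str.pyGet? word n with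
      | none => d
      | some c =>
        let charIdx : Int := (c.toNat : Int) - 97 + 1
        let d' := if d.contains charIdx then d else d.insert charIdx []
        d'.modify charIdx [] (fun l => l ++ [word])) PySem.Dict.empty
  let sortedKeys := PySem.List.sorted d.keys (fun x => x) false
  let res := sortedKeys.foldl (fun (acc : List String × List (List String)) idx =>
      let wordList := d.getD idx []
      if wordList.length > 1 then
        let s := PySem.Str.join " ? " (wordList.map (fun w => "\"" ++ w ++ "\""))
        let s2 := "(" ++ PySem.Int.toStr idx ++ ") [" ++ s ++ "]"
        (acc.1 ++ [s2], acc.2 ++ [wordList])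
      else
        -- word_list[0]: the key idx was only ever created together with an appended word, so the list is nonempty
        let w := (PySem.List.pyGet? wordList 0).getD ""
        (acc.1 ++ ["(" ++ PySem.Int.toStr idx ++ ") \"" ++ w ++ "\""], acc.2)) ([], [])
  (PySem.Str.join " < " res.1, res.2)

-- ===== PORT B =====
-- ord(w[n]) - ord('a') + 1; the none branch (w[n] raising) is outside Pre_
def pvKey (n : Int) (w : String) : Int :=
  match PySem.Str.pyGet? w n with
  | some c => (c.toNat : Int) - 97 + 1
  | none => 0

-- _format_group(idx, group); group[0] on an empty group would raise in Python (never reached: groups are nonempty)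
def pvFormatGroup (idx : Int) (group : List String) : String :=
  if group.length > 1 then
    "(" ++ PySem.Int.toStr idx ++ ") [" ++ PySem.Str.join " ? " (group.map (fun w => "\"" ++ w ++ "\"")) ++ "]"
  else
    "(" ++ PySem.Int.toStr idx ++ ") \"" ++ (PySem.List.pyGet? group 0).getD "" ++ "\""

def sort_and_group_by_nth_letter_py_alt (words : List String) (n : Int) : String × List (List String) :=
  let idxs := PySem.List.sorted (PySem.Set.ofList (words.map (pvKey n))) (fun x => x) false
  let groups := idxs.map (fun idx => words.filter (fun w => pvKey n w == idx))
  let parts := (idxs.zip groups).map (fun p => pvFormatGroup p.1 p.2)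
  (PySem.Str.join " < " parts, groups.filter (fun g => decide (g.length > 1)))

-- ===== PRECONDITION & SPEC =====
-- Pre_ excludes exactly the inputs where Python's word[n] raises IndexError for some word
def Pre_sort_and_group_by_nth_letter_py (words : List String) (n : Int) : Prop :=
  ∀ w ∈ words, PySem.Raise.InRange w.toList.length n
instance (words : List String) (n : Int) : Decidable (Pre_sort_and_group_by_nth_letter_py words n) := by unfold Pre_sort_and_group_by_nth_letter_py; infer_instance

def pvWitness_sort_and_group_by_nth_letter_py : List String × Int := (["ba", "aa", "ca"], 1)

def Spec_sort_and_group_by_nth_letter_py (words : List String) (n : Int) (out : String × List (List String)) : Prop := out = sort_and_group_by_nth_letter_py_alt words n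
instance (words : List String) (n : Int) (out : String × List (List String)) : Decidable (Spec_sort_and_group_by_nth_letter_py words n out) := by unfold Spec_sort_and_group_by_nth_letter_py; infer_instance

-- ===== CLAIM (what is proved, stated in full; the proofs are below) =====
def Claim_equal_sort_and_group_by_nth_letter_py : Prop := ∀ (words : List String) (n : Int), Dom_sort_and_group_by_nth_letter_py words n → Pre_sort_and_group_by_nth_letter_py words n → Spec_sort_and_group_by_nth_letter_py words n (sort_and_group_by_nth_letter_py words n)

-- ===== LEMMAS AND PROOFS =====

-- the 'setdefault then append' idiom of A's dict loop is a single Dict.modify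
lemma pv_setdefault_modify (d : PySem.Dict Int (List String)) (k : Int) (f : List String → List String) :
    (if d.contains k then d else d.insert k []).modify k [] f = d.modify k [] f := by
  by_cases h : d.contains k
  · simp [h]
  · have h' : d.contains k = false := by simpa using h
    simp only [h, Bool.false_eq_true, ite_false]
    simp only [PySem.Dict.modify, PySem.Dict.getD_insert_self]
    rw [PySem.Dict.getD_of_not_contains d [] h']
    apply PySem.Dict.ext
    simp only [PySem.Dict.insert]
    simp only [h', Bool.false_eq_true, ite_false]
    have hmem : ∀ p ∈ d.items, (p.1 == k) = false := by
      intro p hp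
      by_contra hc
      simp only [Bool.not_eq_false] at hc
      apply h
      simp only [PySem.Dict.contains, List.any_eq_true]
      exact ⟨p, hp, hc⟩
    simp only [List.map_append,
      List.map_congr_left (fun p hp => by simp [hmem p hp] :
        ∀ p ∈ d.items, (if (p.1 == k) = true then (k, f []) else p) = p)]
    simp

-- inside Pre_, A's grouping fold is the pure keyed-modify fold
lemma pv_fold_eq (words : List String) (n : Int) (h : Pre_sort_and_group_by_nth_letter_py words n) :
    words.foldl (fun d word =>
      match PySem.Str.pyGet? word n with
      | none => d
      | some c =>
        let charIdx : Int := (c.toNat : Int) - 97 + 1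
        let d' := if d.contains charIdx then d else d.insert charIdx []
        d'.modify charIdx [] (fun l => l ++ [word])) PySem.Dict.empty
    = words.foldl (fun d word => d.modify (pvKey n word) [] (fun l => l ++ [word])) PySem.Dict.empty := by
  apply PySem.List.foldl_congr_mem'
  intro w hw acc
  have hne : PySem.Str.pyGet? w n ≠ none := by
    simp only [PySem.Str.pyGet?, PySem.Chars.pyGet?]
    rw [Ne, PySem.List.pyGet?_eq_none_iff]
    simpa using h w hw
  obtain ⟨c, hc⟩ := Option.ne_none_iff_exists'.mp hne
  simp only [hc, pvKey]
  rw [pv_setdefault_modify]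

lemma pv_getD_eq (words : List String) (n : Int) (c : Int) :
    (words.foldl (fun d word => d.modify (pvKey n word) [] (fun l => l ++ [word])) PySem.Dict.empty).getD c []
    = words.filter (fun w => pvKey n w == c) := by
  have h := PySem.Dict.getD_foldl_modify_append (words.map (fun w => (pvKey n w, w))) PySem.Dict.empty c
  rw [List.foldl_map] at h
  simp only [h, PySem.Dict.getD_empty]
  rw [List.filter_map]
  simp [Function.comp_def]

lemma pv_keys_eq (words : List String) (n : Int) :
    (words.foldl (fun d word => d.modify (pvKey n word) [] (fun l => l ++ [word])) PySem.Dict.empty).keys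
    = PySem.Set.ofList (words.map (pvKey n)) := by
  rw [PySem.Dict.keys_foldl_modify_key words (pvKey n) [] (fun _ word l => l ++ [word])]
  simp [PySem.Set.update_nil_left]

-- A's formatting loop, characterised: parts are a map over the keys, subparts a filter of the groups
lemma pv_loop_eq (G : Int → List String) (ks : List Int) (acc : List String × List (List String)) :
    ks.foldl (fun (acc : List String × List (List String)) idx =>
      let wordList := G idx
      if wordList.length > 1 then
        let s := PySem.Str.join " ? " (wordList.map (fun w => "\"" ++ w ++ "\""))
        let s2 := "(" ++ PySem.Int.toStr idx ++ ") [" ++ s ++ "]"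
        (acc.1 ++ [s2], acc.2 ++ [wordList])
      else
        let w := (PySem.List.pyGet? wordList 0).getD ""
        (acc.1 ++ ["(" ++ PySem.Int.toStr idx ++ ") \"" ++ w ++ "\""], acc.2)) acc
    = (acc.1 ++ ks.map (fun k => pvFormatGroup k (G k)),
       acc.2 ++ (ks.map G).filter (fun g => decide (g.length > 1))) := by
  induction ks generalizing acc with
  | nil => simp
  | cons k ks ih =>
    simp only [List.foldl_cons, List.map_cons, List.filter_cons]
    by_cases h : (G k).length > 1
    · simp only [h, if_pos, ih, pvFormatGroup, decide_true]
      simp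
    · simp only [h, ih, pvFormatGroup]
      simp

-- zip of a list with a map over itself, mapped by a binary function, is a single map
lemma pv_zip_map (l : List Int) (g : Int → List String) (F : Int → List String → String) :
    (l.zip (l.map g)).map (fun p => F p.1 p.2) = l.map (fun k => F k (g k)) := by
  induction l with
  | nil => rfl
  | cons x xs ih => simp [ih]

-- ===== VERDICT (by name: the statement is the Claim_ definition above) =====
theorem sort_and_group_by_nth_letter_py_spec : Claim_equal_sort_and_group_by_nth_letter_py := by
  intro words n _ hpre
  unfold Spec_sort_and_group_by_nth_letter_py
  unfold sort_and_group_by_nth_letter_py sort_and_group_by_nth_letter_py_alt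
  dsimp only
  rw [pv_fold_eq words n hpre, pv_keys_eq]
  rw [pv_loop_eq (fun k =>
    (words.foldl (fun d word => d.modify (pvKey n word) [] (fun l => l ++ [word])) PySem.Dict.empty).getD k [])]
  rw [pv_zip_map]
  simp only [pv_getD_eq, List.nil_append]
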